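-- pv_equiv track=rewrite | github.com/skyicechuchu/adventofcode2024 | day18.py | is_path_possible
-- ===== SOURCE A (Python) =====
-- from collections import deque
-- from typing import List, Tuple, Set
--
-- def is_path_possible(grid_size: int, corrupted: Set[Tuple[int, int]]) -> bool:
--     """
--     Check if there is a path from (0,0) to (grid_size-1, grid_size-1)
--     avoiding corrupted coordinates.
--     """
--     if (0, 0) in corrupted or (grid_size-1, grid_size-1) in corrupted:
--         return False
--
--     # right, down, left, up
--     directions = [(0, 1), (1, 0), (0, -1), (-1, 0)]
--
--     queue = deque([(0, 0)])
--     visited = {(0, 0)}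
--
--     while queue:
--         x, y = queue.popleft()
--
--         if x == grid_size-1 and y == grid_size-1:
--             return True
--
--         for dx, dy in directions:
--             new_x, new_y = x + dx, y + dy
--
--             if (0 <= new_x < grid_size and
--                 0 <= new_y < grid_size and
--                 (new_x, new_y) not in corrupted and
--                 (new_x, new_y) not in visited):
--                     queue.append((new_x, new_y))
--                     visited.add((new_x, new_y))
--
--     return False
-- ===== SOURCE B (Python) =====
-- def is_path_possible(grid_size, corrupted):
--     """
--     Check if there is a path from (0,0) to (grid_size-1, grid_size-1)
--     avoiding corrupted coordinates.
--     Connected-component labelling (merge-by-relabel, smaller class into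
--     larger) instead of a BFS traversal.
--     """
--     bad = set(corrupted)
--     if (0, 0) in bad or (grid_size - 1, grid_size - 1) in bad:
--         return False
--     label = {}
--     members = {}
--     nxt = 0
--     for x in range(grid_size):
--         for y in range(grid_size):
--             if (x, y) in bad:
--                 continue
--             ids = []
--             for p in ((x - 1, y), (x, y - 1)):
--                 if p in label:
--                     ids.append(label[p])
--             if not ids:
--                 label[(x, y)] = nxt
--                 members[nxt] = [(x, y)]
--                 nxt += 1
--             else:
--                 keep = ids[0]
--                 if len(ids) == 2 and ids[1] != keep:
--                     other = ids[1]
--                     if len(members[other]) > len(members[keep]):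
--                         keep, other = other, keep
--                     for cell in members[other]:
--                         label[cell] = keep
--                     members[keep].extend(members[other])
--                     del members[other]
--                 label[(x, y)] = keep
--                 members[keep].append((x, y))
--     return (0, 0) in label and label[(0, 0)] == label[(grid_size - 1, grid_size - 1)]
-- ===== Notes on version B (the rewrite author's own statement) =====
-- stated objective: alternative
-- what changed: Replaced the BFS queue/visited traversal by a connected-component labelling sweep: one row-major pass over the grid that merges the component labels of each free cell's upper and left neighbours (relabelling the smaller class into the larger), then compares the labels of start and goal.
import Mathlib
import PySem

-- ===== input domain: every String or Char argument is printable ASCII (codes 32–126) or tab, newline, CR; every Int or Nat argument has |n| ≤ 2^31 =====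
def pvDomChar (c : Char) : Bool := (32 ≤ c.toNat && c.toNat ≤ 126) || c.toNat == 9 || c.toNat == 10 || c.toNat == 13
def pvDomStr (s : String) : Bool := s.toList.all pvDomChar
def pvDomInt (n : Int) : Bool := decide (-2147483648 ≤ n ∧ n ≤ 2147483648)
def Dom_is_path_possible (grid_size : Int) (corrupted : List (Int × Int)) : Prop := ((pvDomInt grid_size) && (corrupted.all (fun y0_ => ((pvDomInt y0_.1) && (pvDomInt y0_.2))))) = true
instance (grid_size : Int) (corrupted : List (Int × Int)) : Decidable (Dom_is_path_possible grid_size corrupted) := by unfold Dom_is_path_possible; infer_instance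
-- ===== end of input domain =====

-- B replaces A's BFS queue/visited traversal by a row-major connected-component
-- labelling sweep (merge the smaller label class into the larger); alternative
-- decomposition of the same reachability test, similar cost.

-- ===== PORT A =====
-- right, down, left, up
def bfsDirs : List (Int × Int) := [(0, 1), (1, 0), (0, -1), (-1, 0)]

-- the body of A's inner `for dx, dy in directions` loop
-- (Python's hash sets `corrupted`/`visited` are modelled by Std.HashSet:
--  exactly the same membership/insert semantics, hash order never observed)
def bfsVisit (n : Int) (corrS : Std.HashSet (Int × Int)) (x y : Int)
    (st : List (Int × Int) × Std.HashSet (Int × Int)) (d : Int × Int) :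
    List (Int × Int) × Std.HashSet (Int × Int) :=
  let nx := x + d.1
  let ny := y + d.2
  if 0 ≤ nx ∧ nx < n ∧ 0 ≤ ny ∧ ny < n ∧ (nx, ny) ∉ corrS ∧ (nx, ny) ∉ st.2
  then (st.1 ++ [(nx, ny)], st.2.insert (nx, ny))
  else st

-- A's `while queue` loop; the fuel only makes it total and is provably sufficient
def bfsLoop (n : Int) (corrS : Std.HashSet (Int × Int)) :
    Nat → List (Int × Int) → Std.HashSet (Int × Int) → Bool
  | 0, _, _ => false
  | _ + 1, [], _ => false
  | fuel + 1, (x, y) :: rest, visited =>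
    if x = n - 1 ∧ y = n - 1 then true
    else
      let st := bfsDirs.foldl (bfsVisit n corrS x y) (rest, visited)
      bfsLoop n corrS fuel st.1 st.2

def is_path_possible (grid_size : Int) (corrupted : List (Int × Int)) : Bool :=
  if (0, 0) ∈ Std.HashSet.ofList corrupted ∨
     (grid_size - 1, grid_size - 1) ∈ Std.HashSet.ofList corrupted then false
  else
    bfsLoop grid_size (Std.HashSet.ofList corrupted) (grid_size.toNat * grid_size.toNat + 1)
      [(0, 0)] ((∅ : Std.HashSet (Int × Int)).insert (0, 0))

-- ===== PORT B =====
-- state: (label : cell → component id, members : id → cells carrying it, next fresh id)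
-- (Python's dicts/set are modelled by Std.HashMap/Std.HashSet: the same
--  lookup/insert/delete semantics, hash order never observed)
abbrev BState := Std.HashMap (Int × Int) Int × Std.HashMap Int (List (Int × Int)) × Int

-- the body of B's inner loop: process one grid cell
def altCell (bad : Std.HashSet (Int × Int)) (st : BState) (x y : Int) : BState :=
  if (x, y) ∈ bad then st
  else
    let label := st.1
    let members := st.2.1
    let nxt := st.2.2
    let ids := [(x - 1, y), (x, y - 1)].foldl
      (fun ids (p : Int × Int) =>
        match label[p]? with
        | some i => ids ++ [i]
        | none => ids) ([] : List Int)
    match ids with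
    | [] =>
        (label.insert (x, y) nxt,
         members.insert nxt [(x, y)], nxt + 1)
    | keep0 :: restIds =>
        let s : BState :=
          match restIds with
          | [other0] =>
            if other0 ≠ keep0 then
              let ko :=
                if (members.getD other0 []).length >
                   (members.getD keep0 []).length
                then (other0, keep0) else (keep0, other0)
              let keep := ko.1
              let other := ko.2
              let mo := members.getD other []
              let label' := mo.foldl (fun l c => l.insert c keep) label
              let members' := members.insert keep
                (members.getD keep [] ++ mo)
              (label', members'.erase other, keep)
            else (label, members, keep0)
          | _ => (label, members, keep0)
        (s.1.insert (x, y) s.2.2,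
         s.2.1.insert s.2.2 (s.2.1.getD s.2.2 [] ++ [(x, y)]),
         nxt)

def is_path_possible_alt (grid_size : Int) (corrupted : List (Int × Int)) : Bool :=
  let bad := Std.HashSet.ofList corrupted
  if (0, 0) ∈ bad ∨ (grid_size - 1, grid_size - 1) ∈ bad then false
  else
    let fin := (PySem.List.pyRange 0 grid_size 1).foldl
      (fun st x => (PySem.List.pyRange 0 grid_size 1).foldl
        (fun st y => altCell bad st x y) st)
      ((∅ : Std.HashMap (Int × Int) Int), (∅ : Std.HashMap Int (List (Int × Int))), (0 : Int))
    match fin.1[((0 : Int), (0 : Int))]? with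
    | none => false
    | some l0 => decide (fin.1[(grid_size - 1, grid_size - 1)]? = some l0)

-- ===== PRECONDITION & SPEC =====
def Spec_is_path_possible (grid_size : Int) (corrupted : List (Int × Int)) (out : Bool) : Prop := out = is_path_possible_alt grid_size corrupted
instance (grid_size : Int) (corrupted : List (Int × Int)) (out : Bool) : Decidable (Spec_is_path_possible grid_size corrupted out) := by unfold Spec_is_path_possible; infer_instance

-- ===== CLAIM (what is proved, stated in full; the proofs are below) =====
def Claim_equal_is_path_possible : Prop := ∀ (grid_size : Int) (corrupted : List (Int × Int)), Dom_is_path_possible grid_size corrupted → Spec_is_path_possible grid_size corrupted (is_path_possible grid_size corrupted)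

-- ===== LEMMAS AND PROOFS =====

-- 4-adjacency of two cells
def adjP (a b : Int × Int) : Prop :=
  (a.1 = b.1 ∧ (b.2 = a.2 + 1 ∨ a.2 = b.2 + 1)) ∨
  (a.2 = b.2 ∧ (b.1 = a.1 + 1 ∨ a.1 = b.1 + 1))

-- connectivity inside the cell set S
def connP (S : Int × Int → Prop) : Int × Int → Int × Int → Prop :=
  Relation.ReflTransGen (fun a b => S a ∧ S b ∧ adjP a b)

-- in-grid, non-corrupted cells
def FreeC (n : Int) (corr : List (Int × Int)) (c : Int × Int) : Prop :=
  0 ≤ c.1 ∧ c.1 < n ∧ 0 ≤ c.2 ∧ c.2 < n ∧ c ∉ corr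

-- free cells strictly before (x,y) in row-major order
def Pref (n : Int) (corr : List (Int × Int)) (x y : Int) (c : Int × Int) : Prop :=
  0 ≤ c.1 ∧ c.1 < n ∧ 0 ≤ c.2 ∧ c.2 < n ∧ c ∉ corr ∧
  (c.1 < x ∨ (c.1 = x ∧ c.2 < y))

lemma adjP_symm {a b : Int × Int} (h : adjP a b) : adjP b a := by
  obtain ⟨a1, a2⟩ := a; obtain ⟨b1, b2⟩ := b; simp only [adjP] at *; omega

lemma adjP_irrefl (a : Int × Int) : ¬ adjP a a := by
  obtain ⟨a1, a2⟩ := a; simp only [adjP]; omega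

lemma connP_symm {S : Int × Int → Prop} {u v : Int × Int}
    (h : connP S u v) : connP S v u :=
  Relation.ReflTransGen.symmetric
    (fun _ _ hab => ⟨hab.2.1, hab.1, adjP_symm hab.2.2⟩) h

lemma connP_mono {S T : Int × Int → Prop} (hST : ∀ c, S c → T c)
    {u v : Int × Int} (h : connP S u v) : connP T u v :=
  Relation.ReflTransGen.mono (fun _ _ hab => ⟨hST _ hab.1, hST _ hab.2.1, hab.2.2⟩) h

lemma connP_congr {S T : Int × Int → Prop} (hST : ∀ c, S c ↔ T c)
    (u v : Int × Int) : connP S u v ↔ connP T u v :=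
  ⟨connP_mono (fun c => (hST c).1), connP_mono (fun c => (hST c).2)⟩

lemma connP_closed {F : Int × Int → Prop} {V : List (Int × Int)}
    (hcl : ∀ c ∈ V, ∀ d, F d → adjP c d → d ∈ V) {s w : Int × Int}
    (hs : s ∈ V) (h : connP F s w) : w ∈ V := by
  induction h with
  | refl => exact hs
  | tail _ e ih => exact hcl _ ih _ e.2.1 e.2.2

-- small bridges for Std.HashSet / Std.HashMap on decidable-equality keys
lemma hs_mem_ofList {α : Type} [BEq α] [Hashable α] [LawfulBEq α] [LawfulHashable α]
    (l : List α) (w : α) : w ∈ Std.HashSet.ofList l ↔ w ∈ l := by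
  rw [Std.HashSet.mem_ofList]; simp

lemma hs_mem_insert {α : Type} [BEq α] [Hashable α] [LawfulBEq α] [LawfulHashable α]
    (V : Std.HashSet α) (u w : α) : w ∈ V.insert u ↔ w ∈ V ∨ w = u := by
  rw [Std.HashSet.mem_insert]
  constructor
  · rintro (h | h)
    · exact Or.inr (beq_iff_eq.mp h).symm
    · exact Or.inl h
  · rintro (h | h)
    · exact Or.inr h
    · exact Or.inl (by simp [h])

lemma hs_size_insert_of_not_mem {α : Type} [BEq α] [Hashable α] [LawfulBEq α] [LawfulHashable α]
    (V : Std.HashSet α) (u : α) (hu : u ∉ V) : (V.insert u).size = V.size + 1 := by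
  rw [Std.HashSet.size_insert, if_neg hu]

lemma hm_get?_insert {κ ν : Type} [BEq κ] [Hashable κ] [LawfulBEq κ] [LawfulHashable κ]
    [DecidableEq κ] (m : Std.HashMap κ ν) (k k' : κ) (v : ν) :
    (m.insert k v)[k']? = if k' = k then some v else m[k']? := by
  rw [Std.HashMap.getElem?_insert]
  by_cases h : k' = k
  · simp [h]
  · rw [if_neg (by simpa using fun hh : k = k' => h hh.symm), if_neg h]

lemma hm_get?_erase {κ ν : Type} [BEq κ] [Hashable κ] [LawfulBEq κ] [LawfulHashable κ]
    [DecidableEq κ] (m : Std.HashMap κ ν) (k k' : κ) :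
    (m.erase k)[k']? = if k' = k then none else m[k']? := by
  rw [Std.HashMap.getElem?_erase]
  by_cases h : k' = k
  · simp [h]
  · rw [if_neg (by simpa using fun hh : k = k' => h hh.symm), if_neg h]

-- every 4-neighbour of (x,y) is (x,y)+d for d in bfsDirs
lemma adjP_iff_dirs (x y : Int) (w : Int × Int) :
    adjP (x, y) w ↔ ∃ d ∈ bfsDirs, w = (x + d.1, y + d.2) := by
  obtain ⟨wx, wy⟩ := w
  simp [bfsDirs, adjP, Prod.ext_iff]
  constructor
  · rintro (⟨h1, h2 | h2⟩ | ⟨h1, h2 | h2⟩)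
    · exact ⟨0, 1, by omega, by omega, by omega⟩
    · exact ⟨0, -1, by omega, by omega, by omega⟩
    · exact ⟨1, 0, by omega, by omega, by omega⟩
    · exact ⟨-1, 0, by omega, by omega, by omega⟩
  · rintro ⟨a, b, hab, h1, h2⟩
    omega

-- the only row-major predecessors adjacent to (x,y) are up and left
lemma pref_neighbors {n : Int} {corr : List (Int × Int)} {x y : Int} {d : Int × Int}
    (hp : Pref n corr x y d) (ha : adjP d (x, y)) :
    d = (x - 1, y) ∨ d = (x, y - 1) := by
  obtain ⟨dx, dy⟩ := d
  simp only [Pref, adjP] at hp ha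
  simp [Prod.ext_iff]
  omega

-- ----- the extension lemma: adding one cell c to S -----
lemma connP_insert_aux (S : Int × Int → Prop) (c : Int × Int) (hc : ¬ S c)
    (v : Int × Int) (hv : S v) :
    ∀ u, connP (fun d => S d ∨ d = c) u v →
      (S u → (connP S u v ∨
        ((∃ a, S a ∧ adjP a c ∧ connP S u a) ∧ (∃ b, S b ∧ adjP b c ∧ connP S b v)))) ∧
      (u = c → ∃ b, S b ∧ adjP b c ∧ connP S b v) := by
  intro u h
  induction h using Relation.ReflTransGen.head_induction_on with
  | refl =>
      refine ⟨fun _ => Or.inl Relation.ReflTransGen.refl, fun huc => absurd (huc ▸ hv) hc⟩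
  | @head u2 w2 e hpath ih =>
      obtain ⟨ha', hb', hadj⟩ := e
      constructor
      · intro hu
        rcases hb' with hSb | hbc
        · rcases ih.1 hSb with hconn | ⟨⟨a0, hSa0, haj0, hc0⟩, hR⟩
          · exact Or.inl (Relation.ReflTransGen.head ⟨hu, hSb, hadj⟩ hconn)
          · exact Or.inr ⟨⟨a0, hSa0, haj0,
              Relation.ReflTransGen.head ⟨hu, hSb, hadj⟩ hc0⟩, hR⟩
        · exact Or.inr ⟨⟨u2, hu, hbc ▸ hadj, Relation.ReflTransGen.refl⟩, ih.2 hbc⟩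
      · intro huc
        subst huc
        rcases hb' with hSb | hbc
        · rcases ih.1 hSb with hconn | ⟨_, hR⟩
          · exact ⟨_, hSb, adjP_symm hadj, hconn⟩
          · exact hR
        · exact absurd (hbc ▸ hadj) (adjP_irrefl _)

lemma connP_insert_old {S : Int × Int → Prop} {c : Int × Int} (hc : ¬ S c)
    {u v : Int × Int} (hu : S u) (hv : S v) :
    connP (fun d => S d ∨ d = c) u v ↔
      connP S u v ∨
        ((∃ a, S a ∧ adjP a c ∧ connP S u a) ∧ (∃ b, S b ∧ adjP b c ∧ connP S b v)) := by
  constructor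
  · intro h; exact (connP_insert_aux S c hc v hv u h).1 hu
  · rintro (h | ⟨⟨a, hSa, hac, hua⟩, ⟨b, hSb, hbc, hbv⟩⟩)
    · exact connP_mono (fun d hd => Or.inl hd) h
    · have h1 : connP (fun d => S d ∨ d = c) u a :=
        connP_mono (fun d hd => Or.inl hd) hua
      have h2 : connP (fun d => S d ∨ d = c) b v :=
        connP_mono (fun d hd => Or.inl hd) hbv
      exact ((h1.tail ⟨Or.inl hSa, Or.inr rfl, hac⟩).tail
        ⟨Or.inr rfl, Or.inl hSb, adjP_symm hbc⟩).trans h2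

lemma connP_insert_new {S : Int × Int → Prop} {c : Int × Int} (hc : ¬ S c)
    {v : Int × Int} (hv : S v) :
    connP (fun d => S d ∨ d = c) c v ↔ ∃ b, S b ∧ adjP b c ∧ connP S b v := by
  constructor
  · intro h; exact (connP_insert_aux S c hc v hv c h).2 rfl
  · rintro ⟨b, hSb, hbc, hbv⟩
    exact Relation.ReflTransGen.head ⟨Or.inr rfl, Or.inl hSb, adjP_symm hbc⟩
      (connP_mono (fun d hd => Or.inl hd) hbv)

-- ----- side A: BFS -----
noncomputable def gridFS (n : Int) : Finset (Int × Int) :=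
  Finset.Icc 0 (n - 1) ×ˢ Finset.Icc 0 (n - 1)

lemma mem_gridFS {n : Int} {c : Int × Int} :
    c ∈ gridFS n ↔ 0 ≤ c.1 ∧ c.1 < n ∧ 0 ≤ c.2 ∧ c.2 < n := by
  simp [gridFS, Finset.mem_product]; omega

noncomputable def gridC (n : Int) : Nat := (gridFS n).card

lemma hs_size_le_grid (n : Int) (V : Std.HashSet (Int × Int))
    (hsub : ∀ w ∈ V, w ∈ gridFS n) : V.size ≤ (gridFS n).card := by
  rw [← Std.HashSet.length_toList]
  have hnd : V.toList.Nodup := by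
    have h := Std.HashSet.distinct_toList (m := V)
    exact h.imp (fun hab => by simpa using hab)
  have hsub' : V.toList.toFinset ⊆ gridFS n := by
    intro w hw
    rw [List.mem_toFinset, Std.HashSet.mem_toList] at hw
    exact hsub w hw
  calc V.toList.length = V.toList.toFinset.card := (List.toFinset_card_of_nodup hnd).symm
    _ ≤ _ := Finset.card_le_card hsub'

def BfsInv (n : Int) (corr : List (Int × Int)) (q : List (Int × Int))
    (V : Std.HashSet (Int × Int)) : Prop :=
  (0, 0) ∈ V ∧ (∀ c ∈ q, c ∈ V) ∧
  (∀ c ∈ V, FreeC n corr c ∧ connP (FreeC n corr) (0, 0) c) ∧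
  (∀ c ∈ V, c ∉ q → ∀ d, FreeC n corr d → adjP c d → d ∈ V) ∧
  ((n - 1, n - 1) ∈ V → (n - 1, n - 1) ∈ q)

lemma bfs_fold (n : Int) (corr : List (Int × Int)) (x y : Int)
    (dirs : List (Int × Int)) :
    ∀ (q : List (Int × Int)) (V : Std.HashSet (Int × Int)),
    ∃ add : List (Int × Int),
      (dirs.foldl (bfsVisit n (Std.HashSet.ofList corr) x y) (q, V)).1 = q ++ add ∧
      (∀ w, w ∈ (dirs.foldl (bfsVisit n (Std.HashSet.ofList corr) x y) (q, V)).2 ↔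
        w ∈ V ∨ w ∈ add) ∧
      (dirs.foldl (bfsVisit n (Std.HashSet.ofList corr) x y) (q, V)).2.size
        = V.size + add.length ∧
      add.Nodup ∧
      (∀ w, w ∈ add ↔ (w ∉ V ∧ ∃ d ∈ dirs, w = (x + d.1, y + d.2) ∧
        0 ≤ w.1 ∧ w.1 < n ∧ 0 ≤ w.2 ∧ w.2 < n ∧ w ∉ corr)) := by
  induction dirs with
  | nil =>
      intro q V
      exact ⟨[], by simp, by simp, by simp, by simp, by simp⟩
  | cons d ds ih =>
      intro q V
      simp only [List.foldl_cons]
      by_cases hcond : 0 ≤ x + d.1 ∧ x + d.1 < n ∧ 0 ≤ y + d.2 ∧ y + d.2 < n ∧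
          (x + d.1, y + d.2) ∉ Std.HashSet.ofList corr ∧ (x + d.1, y + d.2) ∉ V
      · have hstep : bfsVisit n (Std.HashSet.ofList corr) x y (q, V) d =
            (q ++ [(x + d.1, y + d.2)], V.insert (x + d.1, y + d.2)) := by
          simp only [bfsVisit]; rw [if_pos hcond]
        rw [hstep]
        obtain ⟨add, h1, h2, h3, h4, h5⟩ :=
          ih (q ++ [(x + d.1, y + d.2)]) (V.insert (x + d.1, y + d.2))
        have hcor : (x + d.1, y + d.2) ∉ corr := by
          have := hcond.2.2.2.2.1
          rw [hs_mem_ofList] at this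
          exact this
        refine ⟨(x + d.1, y + d.2) :: add, ?_, ?_, ?_, ?_, ?_⟩
        · rw [h1]; simp
        · intro w
          rw [h2 w, hs_mem_insert, List.mem_cons]
          tauto
        · rw [h3, hs_size_insert_of_not_mem _ _ hcond.2.2.2.2.2]
          simp
          omega
        · rw [List.nodup_cons]
          refine ⟨?_, h4⟩
          intro hmem
          have := ((h5 _).mp hmem).1
          rw [hs_mem_insert] at this
          exact this (Or.inr rfl)
        · intro w
          rw [List.mem_cons, h5 w, hs_mem_insert]
          constructor
          · rintro (rfl | ⟨hwV, d', hd', rfl, hb⟩)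
            · exact ⟨hcond.2.2.2.2.2, d, by simp, rfl, hcond.1, hcond.2.1,
                hcond.2.2.1, hcond.2.2.2.1, hcor⟩
            · refine ⟨fun hw => hwV (Or.inl hw), d', List.mem_cons_of_mem _ hd', rfl, hb⟩
          · rintro ⟨hwV, d', hd', rfl, hb⟩
            rcases List.mem_cons.mp hd' with rfl | hd'
            · exact Or.inl rfl
            · by_cases hww : (x + d'.1, y + d'.2) = (x + d.1, y + d.2)
              · exact Or.inl hww
              · refine Or.inr ⟨?_, d', hd', rfl, hb⟩
                rintro (hm | hm)
                · exact hwV hm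
                · exact hww hm
      · have hstep : bfsVisit n (Std.HashSet.ofList corr) x y (q, V) d = (q, V) := by
          simp only [bfsVisit]; rw [if_neg hcond]
        rw [hstep]
        obtain ⟨add, h1, h2, h3, h4, h5⟩ := ih q V
        refine ⟨add, h1, h2, h3, h4, ?_⟩
        intro w
        rw [h5 w]
        constructor
        · rintro ⟨hwV, d', hd', rfl, hb⟩
          exact ⟨hwV, d', List.mem_cons_of_mem _ hd', rfl, hb⟩
        · rintro ⟨hwV, d', hd', rfl, hb⟩
          rcases List.mem_cons.mp hd' with rfl | hd'
          · refine absurd ⟨hb.1, hb.2.1, hb.2.2.1, hb.2.2.2.1, ?_, hwV⟩ hcond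
            rw [hs_mem_ofList]
            exact hb.2.2.2.2
          · exact ⟨hwV, d', hd', rfl, hb⟩

lemma bfs_empty_no_path {n : Int} {corr : List (Int × Int)} {V : Std.HashSet (Int × Int)}
    (h : BfsInv n corr [] V) : ¬ connP (FreeC n corr) (0, 0) (n - 1, n - 1) := by
  obtain ⟨hstart, hq, hfree, hcl, hgoal⟩ := h
  intro hconn
  have hv : (n - 1, n - 1) ∈ V := by
    have hv' : (n - 1, n - 1) ∈ V.toList := by
      refine connP_closed (F := FreeC n corr)
        (V := V.toList) ?_ (by rwa [Std.HashSet.mem_toList]) hconn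
      intro c hc d hd hadj
      rw [Std.HashSet.mem_toList] at hc ⊢
      exact hcl c hc (by simp) d hd hadj
    rwa [Std.HashSet.mem_toList] at hv'
  simpa using hgoal hv

lemma bfsLoop_correct (n : Int) (corr : List (Int × Int)) :
    ∀ (fuel : Nat) (q : List (Int × Int)) (V : Std.HashSet (Int × Int)),
      BfsInv n corr q V →
      q.length + (gridFS n).card ≤ fuel + V.size →
      (bfsLoop n (Std.HashSet.ofList corr) fuel q V = true ↔
        connP (FreeC n corr) (0, 0) (n - 1, n - 1)) := by
  intro fuel
  induction fuel with
  | zero =>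
      intro q V hInv hfuel
      have hsz : V.size ≤ (gridFS n).card := by
        refine hs_size_le_grid n V ?_
        intro w hw
        have := (hInv.2.2.1 w hw).1
        rw [mem_gridFS]
        exact ⟨this.1, this.2.1, this.2.2.1, this.2.2.2.1⟩
      have hq : q = [] := List.length_eq_zero_iff.mp (by omega)
      subst hq
      simp only [bfsLoop, Bool.false_eq_true, false_iff]
      exact bfs_empty_no_path hInv
  | succ fuel ih =>
      intro q V hInv hfuel
      cases q with
      | nil =>
          simp only [bfsLoop, Bool.false_eq_true, false_iff]
          exact bfs_empty_no_path hInv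
      | cons c rest =>
          obtain ⟨cx, cy⟩ := c
          obtain ⟨hstart, hq, hfree, hcl, hgoal⟩ := hInv
          by_cases hxy : cx = n - 1 ∧ cy = n - 1
          · have hT : bfsLoop n (Std.HashSet.ofList corr) (fuel + 1) ((cx, cy) :: rest) V = true := by
              simp only [bfsLoop]; rw [if_pos hxy]
            rw [hT]
            simp only [true_iff]
            have hc := (hfree _ (hq _ List.mem_cons_self)).2
            have heq : ((cx : Int), (cy : Int)) = (n - 1, n - 1) := by
              rw [hxy.1, hxy.2]
            rw [← heq]
            exact hc
          · obtain ⟨add, h1, h2, h3, h4, h5⟩ := bfs_fold n corr cx cy bfsDirs rest V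
            have hun : bfsLoop n (Std.HashSet.ofList corr) (fuel + 1) ((cx, cy) :: rest) V
                = bfsLoop n (Std.HashSet.ofList corr) fuel
                    (bfsDirs.foldl (bfsVisit n (Std.HashSet.ofList corr) cx cy) (rest, V)).1
                    (bfsDirs.foldl (bfsVisit n (Std.HashSet.ofList corr) cx cy) (rest, V)).2 := by
              simp only [bfsLoop]; rw [if_neg hxy]
            rw [hun, h1]
            apply ih
            · refine ⟨(h2 _).mpr (Or.inl hstart), ?_, ?_, ?_, ?_⟩
              · intro w hw
                rcases List.mem_append.mp hw with h | h
                · exact (h2 w).mpr (Or.inl (hq w (List.mem_cons_of_mem _ h)))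
                · exact (h2 w).mpr (Or.inr h)
              · intro w hw
                rcases (h2 w).mp hw with h | h
                · exact hfree w h
                · obtain ⟨hwV, d', hd', rfl, hb⟩ := (h5 w).mp h
                  have hFw : FreeC n corr (cx + d'.1, cy + d'.2) :=
                    ⟨hb.1, hb.2.1, hb.2.2.1, hb.2.2.2.1, hb.2.2.2.2⟩
                  obtain ⟨hFc, hRc⟩ := hfree _ (hq _ List.mem_cons_self)
                  refine ⟨hFw, hRc.tail ⟨hFc, hFw, ?_⟩⟩
                  exact (adjP_iff_dirs cx cy _).mpr ⟨d', hd', rfl⟩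
              · intro w hw hwq d hd hadj
                rcases (h2 w).mp hw with hwV | hwA
                · by_cases hwc : w = (cx, cy)
                  · subst hwc
                    obtain ⟨dd, hdd, rfl⟩ := (adjP_iff_dirs cx cy d).mp hadj
                    by_cases hdV : (cx + dd.1, cy + dd.2) ∈ V
                    · exact (h2 _).mpr (Or.inl hdV)
                    · exact (h2 _).mpr (Or.inr ((h5 _).mpr
                        ⟨hdV, dd, hdd, rfl, hd.1, hd.2.1, hd.2.2.1, hd.2.2.2.1, hd.2.2.2.2⟩))
                  · have hwrest : w ∉ rest := fun hr => hwq (List.mem_append_left _ hr)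
                    have hwq' : w ∉ (cx, cy) :: rest := by simp [hwc, hwrest]
                    exact (h2 _).mpr (Or.inl (hcl w hwV hwq' d hd hadj))
                · exact absurd (List.mem_append_right _ hwA) hwq
              · intro hgv
                rcases (h2 _).mp hgv with hgV | hgA
                · rcases List.mem_cons.mp (hgoal hgV) with heq | hr
                  · exact absurd ⟨(congrArg Prod.fst heq).symm, (congrArg Prod.snd heq).symm⟩ hxy
                  · exact List.mem_append_left _ hr
                · exact List.mem_append_right _ hgA
            · rw [h3]
              have hlen : (rest ++ add).length = rest.length + add.length := List.length_append
              have hq1 : ((cx, cy) :: rest).length = rest.length + 1 := List.length_cons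
              omega

lemma A_iff (n : Int) (corr : List (Int × Int)) (hn : 1 ≤ n)
    (hs : (0, 0) ∉ corr) (hg : (n - 1, n - 1) ∉ corr) :
    (is_path_possible n corr = true ↔ connP (FreeC n corr) (0, 0) (n - 1, n - 1)) := by
  unfold is_path_possible
  rw [if_neg (by
    rw [hs_mem_ofList, hs_mem_ofList]
    rintro (h | h); exacts [hs h, hg h])]
  refine bfsLoop_correct n corr _ _ _ ?_ ?_
  · refine ⟨?_, ?_, ?_, ?_, ?_⟩
    · rw [hs_mem_insert]; exact Or.inr rfl
    · intro c hc
      rw [List.mem_singleton] at hc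
      rw [hs_mem_insert]
      exact Or.inr hc
    · intro c hc
      rw [hs_mem_insert] at hc
      rcases hc with hc | hc
      · exact absurd hc (Std.HashSet.not_mem_empty)
      · subst hc
        exact ⟨⟨le_refl _, by omega, le_refl _, by omega, hs⟩, Relation.ReflTransGen.refl⟩
    · intro c hc hcq
      rw [hs_mem_insert] at hc
      rcases hc with hc | hc
      · exact absurd hc (Std.HashSet.not_mem_empty)
      · exact absurd (by simp [hc]) hcq
    · intro hgv
      rw [hs_mem_insert] at hgv
      rcases hgv with hgv | hgv
      · exact absurd hgv (Std.HashSet.not_mem_empty)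
      · simp [hgv]
  · have h1 : (gridFS n).card = n.toNat * n.toNat := by
      rw [gridFS, Finset.card_product]
      rw [Int.card_Icc]
      norm_num
    have h2 : ((∅ : Std.HashSet (Int × Int)).insert (0, 0)).size = 1 := by
      rw [hs_size_insert_of_not_mem _ _ (Std.HashSet.not_mem_empty), Std.HashSet.size_empty]
    simp only [List.length_cons, List.length_nil]
    omega

lemma A_nonpos (n : Int) (corr : List (Int × Int)) (hn : n ≤ 0)
    (hs : (0, 0) ∉ corr) (hg : (n - 1, n - 1) ∉ corr) :
    is_path_possible n corr = false := by
  unfold is_path_possible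
  rw [if_neg (by
    rw [hs_mem_ofList, hs_mem_ofList]
    rintro (h | h); exacts [hs h, hg h])]
  have ht : n.toNat = 0 := Int.toNat_of_nonpos hn
  rw [ht]
  simp only [Nat.zero_mul, Nat.zero_add]
  simp only [bfsLoop]
  rw [if_neg (by rintro ⟨h, -⟩; omega)]

-- ----- side B: component labelling -----
def BInv (n : Int) (corr : List (Int × Int)) (x y : Int) (st : BState) : Prop :=
  (∀ c : Int × Int, (st.1[c]?).isSome ↔ Pref n corr x y c) ∧
  (∀ (u v : Int × Int) (i j : Int), st.1[u]? = some i → st.1[v]? = some j →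
    (i = j ↔ connP (Pref n corr x y) u v)) ∧
  (∀ (c : Int × Int) (i : Int), st.1[c]? = some i → i < st.2.2) ∧
  (∀ (j : Int) (c : Int × Int), (∃ lst, st.2.1[j]? = some lst ∧ c ∈ lst) ↔ st.1[c]? = some j)

lemma BInv_def (n : Int) (corr : List (Int × Int)) (x y : Int)
    (L : Std.HashMap (Int × Int) Int) (M : Std.HashMap Int (List (Int × Int))) (nxt : Int) :
    BInv n corr x y (L, M, nxt) ↔
      ((∀ c : Int × Int, (L[c]?).isSome ↔ Pref n corr x y c) ∧
       (∀ (u v : Int × Int) (i j : Int), L[u]? = some i → L[v]? = some j →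
         (i = j ↔ connP (Pref n corr x y) u v)) ∧
       (∀ (c : Int × Int) (i : Int), L[c]? = some i → i < nxt) ∧
       (∀ (j : Int) (c : Int × Int), (∃ lst, M[j]? = some lst ∧ c ∈ lst) ↔ L[c]? = some j)) :=
  Iff.rfl

lemma get?_foldl_insert_const (mo : List (Int × Int)) (kp : Int) :
    ∀ (L : Std.HashMap (Int × Int) Int) (u : Int × Int),
    ((mo.foldl (fun l c => l.insert c kp) L)[u]?) =
      if u ∈ mo then some kp else L[u]? := by
  induction mo with
  | nil => intro L u; simp
  | cons c t ih =>
      intro L u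
      simp only [List.foldl_cons, ih, List.mem_cons]
      by_cases hu : u ∈ t
      · simp [hu]
      · by_cases huc : u = c
        · simp [hu, huc, hm_get?_insert]
        · simp only [hu, huc, false_or, if_false]
          rw [hm_get?_insert, if_neg huc]

lemma BInv_congr {n : Int} {corr : List (Int × Int)} {x y x' y' : Int}
    (h : ∀ c, Pref n corr x y c ↔ Pref n corr x' y' c) (st : BState) :
    BInv n corr x y st → BInv n corr x' y' st := by
  rintro ⟨h1, h2, h3, h4⟩
  exact ⟨fun c => (h1 c).trans (h c),
    fun u v i j hu hv => (h2 u v i j hu hv).trans (connP_congr h u v), h3, h4⟩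

lemma not_pref_self (n : Int) (corr : List (Int × Int)) (x y : Int) :
    ¬ Pref n corr x y (x, y) := by
  rintro ⟨-, -, -, -, -, h6⟩
  simp at h6 <;> omega

lemma pref_succ_iff {n : Int} {corr : List (Int × Int)} {x y : Int}
    (hx : 0 ≤ x) (hx' : x < n) (hy : 0 ≤ y) (hy' : y < n) (hbad : (x, y) ∉ corr) :
    ∀ w, Pref n corr x (y + 1) w ↔ (Pref n corr x y w ∨ w = (x, y)) := by
  rintro ⟨w1, w2⟩
  simp only [Pref, Prod.mk.injEq]
  constructor
  · rintro ⟨a1, a2, a3, a4, a5, a6⟩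
    by_cases hqq : w1 = x ∧ w2 = y
    · exact Or.inr hqq
    · exact Or.inl ⟨a1, a2, a3, a4, a5, by simp at a6 ⊢ <;> omega⟩
  · rintro (⟨a1, a2, a3, a4, a5, a6⟩ | ⟨e1, e2⟩)
    · exact ⟨a1, a2, a3, a4, a5, by simp at a6 ⊢ <;> omega⟩
    · subst e1; subst e2
      exact ⟨hx, hx', hy, hy', hbad, by simp <;> omega⟩

lemma pref_skip_iff {n : Int} {corr : List (Int × Int)} {x y : Int}
    (hbad : (x, y) ∈ corr) :
    ∀ w, Pref n corr x y w ↔ Pref n corr x (y + 1) w := by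
  rintro ⟨w1, w2⟩
  simp only [Pref]
  constructor
  · rintro ⟨a1, a2, a3, a4, a5, a6⟩
    exact ⟨a1, a2, a3, a4, a5, by simp at a6 ⊢ <;> omega⟩
  · rintro ⟨a1, a2, a3, a4, a5, a6⟩
    refine ⟨a1, a2, a3, a4, a5, ?_⟩
    have hne : ¬ (w1 = x ∧ w2 = y) := by
      rintro ⟨e1, e2⟩; subst e1; subst e2; exact a5 hbad
    simp at a6 ⊢
    omega

lemma adj_up (x y : Int) : adjP (x - 1, y) (x, y) := by
  simp [adjP]

lemma adj_left (x y : Int) : adjP (x, y - 1) (x, y) := by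
  simp [adjP]

lemma binv_fresh (n : Int) (corr : List (Int × Int)) (x y : Int)
    (L : Std.HashMap (Int × Int) Int) (M : Std.HashMap Int (List (Int × Int))) (nxt : Int)
    (hx : 0 ≤ x) (hx' : x < n) (hy : 0 ≤ y) (hy' : y < n) (hbad : (x, y) ∉ corr)
    (h : BInv n corr x y (L, M, nxt))
    (hne : ∀ b, Pref n corr x y b → adjP b (x, y) → False) :
    BInv n corr x (y + 1)
      (L.insert (x, y) nxt, M.insert nxt [(x, y)], nxt + 1) := by
  rw [BInv_def] at h
  rw [BInv_def]
  obtain ⟨h1, h2, h3, h4⟩ := h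
  have hS' := pref_succ_iff hx hx' hy hy' hbad (n := n) (corr := corr)
  have hSc := not_pref_self n corr x y
  have hLc : L[(x, y)]? = none := by
    rcases hq : L[(x, y)]? with _ | i
    · rfl
    · exact absurd ((h1 _).mp (by rw [hq]; rfl)) hSc
  have hconn_new : ∀ v, Pref n corr x y v → ¬ connP (Pref n corr x (y + 1)) (x, y) v := by
    intro v hSv hcon
    rw [connP_congr hS'] at hcon
    obtain ⟨b, hSb, hab, -⟩ := (connP_insert_new hSc hSv).mp hcon
    exact hne b hSb hab
  have hconn_old : ∀ u v, Pref n corr x y u → Pref n corr x y v →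
      (connP (Pref n corr x (y + 1)) u v ↔ connP (Pref n corr x y) u v) := by
    intro u v hSu hSv
    rw [connP_congr hS', connP_insert_old hSc hSu hSv]
    constructor
    · rintro (hc | ⟨⟨a, hSa, haj, -⟩, -⟩)
      · exact hc
      · exact absurd haj (fun hj => hne a hSa hj)
    · exact Or.inl
  refine ⟨?_, ?_, ?_, ?_⟩
  · intro w
    rw [hm_get?_insert]
    by_cases hw : w = (x, y)
    · rw [if_pos hw, hS' w]; simp [hw]
    · rw [if_neg hw, h1 w, hS' w]; simp [hw]
  · intro u v iu jv hu' hv'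
    rw [hm_get?_insert] at hu' hv'
    by_cases hcu : u = (x, y) <;> by_cases hcv : v = (x, y)
    · rw [if_pos hcu] at hu'; rw [if_pos hcv] at hv'
      have e1 : nxt = iu := Option.some_inj.mp hu'
      have e2 : nxt = jv := Option.some_inj.mp hv'
      subst hcu; subst hcv
      constructor
      · intro _; exact Relation.ReflTransGen.refl
      · intro _; omega
    · rw [if_pos hcu] at hu'; rw [if_neg hcv] at hv'
      have e1 : nxt = iu := Option.some_inj.mp hu'
      have hSv : Pref n corr x y v := (h1 v).mp (by rw [hv']; rfl)
      have hjv : jv < nxt := h3 _ _ hv'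
      subst hcu
      constructor
      · intro h; omega
      · intro h; exact absurd h (hconn_new v hSv)
    · rw [if_neg hcu] at hu'; rw [if_pos hcv] at hv'
      have e2 : nxt = jv := Option.some_inj.mp hv'
      have hSu : Pref n corr x y u := (h1 u).mp (by rw [hu']; rfl)
      have hiu : iu < nxt := h3 _ _ hu'
      subst hcv
      constructor
      · intro h; omega
      · intro h; exact absurd (connP_symm h) (hconn_new u hSu)
    · rw [if_neg hcu] at hu'; rw [if_neg hcv] at hv'
      have hSu : Pref n corr x y u := (h1 u).mp (by rw [hu']; rfl)
      have hSv : Pref n corr x y v := (h1 v).mp (by rw [hv']; rfl)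
      rw [hconn_old u v hSu hSv]
      exact h2 u v iu jv hu' hv'
  · intro w i hwi
    rw [hm_get?_insert] at hwi
    by_cases hw : w = (x, y)
    · rw [if_pos hw] at hwi
      have : nxt = i := Option.some_inj.mp hwi
      omega
    · rw [if_neg hw] at hwi
      have := h3 w i hwi
      omega
  · intro jj cc
    rw [hm_get?_insert]
    by_cases hj : jj = nxt
    · subst hj
      rw [if_pos rfl]
      constructor
      · rintro ⟨lst, hsome, hin⟩
        have hlst : lst = [(x, y)] := (Option.some_inj.mp hsome).symm
        subst hlst
        rw [List.mem_singleton] at hin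
        subst hin
        rw [hm_get?_insert, if_pos rfl]
      · intro hcc
        rw [hm_get?_insert] at hcc
        refine ⟨[(x, y)], rfl, ?_⟩
        by_cases hccc : cc = (x, y)
        · simp [hccc]
        · rw [if_neg hccc] at hcc
          have := h3 _ _ hcc
          omega
    · rw [if_neg hj]
      constructor
      · rintro ⟨lst, hsome, hin⟩
        have hlcc := (h4 jj cc).mp ⟨lst, hsome, hin⟩
        have hScc : Pref n corr x y cc := (h1 cc).mp (by rw [hlcc]; rfl)
        have hnecc : cc ≠ (x, y) := fun e => hSc (e ▸ hScc)
        rw [hm_get?_insert, if_neg hnecc]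
        exact hlcc
      · intro hcc
        rw [hm_get?_insert] at hcc
        by_cases hccc : cc = (x, y)
        · rw [if_pos hccc] at hcc
          exact absurd (Option.some_inj.mp hcc).symm hj
        · rw [if_neg hccc] at hcc
          exact (h4 jj cc).mpr hcc

lemma binv_attach (n : Int) (corr : List (Int × Int)) (x y : Int)
    (L : Std.HashMap (Int × Int) Int) (M : Std.HashMap Int (List (Int × Int))) (nxt kp : Int)
    (hx : 0 ≤ x) (hx' : x < n) (hy : 0 ≤ y) (hy' : y < n) (hbad : (x, y) ∉ corr)
    (h : BInv n corr x y (L, M, nxt))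
    (hall : ∀ b, Pref n corr x y b → adjP b (x, y) → L[b]? = some kp)
    (hex : ∃ b, Pref n corr x y b ∧ adjP b (x, y) ∧ L[b]? = some kp) :
    BInv n corr x (y + 1)
      (L.insert (x, y) kp, M.insert kp (M.getD kp [] ++ [(x, y)]), nxt) := by
  rw [BInv_def] at h
  rw [BInv_def]
  obtain ⟨h1, h2, h3, h4⟩ := h
  have hS' := pref_succ_iff hx hx' hy hy' hbad (n := n) (corr := corr)
  have hSc := not_pref_self n corr x y
  obtain ⟨b0, hSb0, hab0, hlb0⟩ := hex
  have hkpn : kp < nxt := h3 _ _ hlb0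
  obtain ⟨lk, hMk⟩ : ∃ lk, M[kp]? = some lk := by
    obtain ⟨lst, hm, -⟩ := (h4 kp b0).mpr hlb0
    exact ⟨lst, hm⟩
  have hmemk : ∀ cc, cc ∈ lk ↔ L[cc]? = some kp := by
    intro cc
    constructor
    · intro hcc; exact (h4 kp cc).mp ⟨lk, hMk, hcc⟩
    · intro hcc
      obtain ⟨lst, hm, hin⟩ := (h4 kp cc).mpr hcc
      rw [hMk] at hm
      cases Option.some_inj.mp hm
      exact hin
  have hgd : M.getD kp [] = lk := by
    rw [Std.HashMap.getD_eq_getD_getElem?, hMk]; rfl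
  have hconn_new : ∀ v lv, L[v]? = some lv →
      (connP (Pref n corr x (y + 1)) (x, y) v ↔ kp = lv) := by
    intro v lv hlv
    have hSv : Pref n corr x y v := (h1 v).mp (by rw [hlv]; rfl)
    rw [connP_congr hS', connP_insert_new hSc hSv]
    constructor
    · rintro ⟨b, hSb, hab, hcb⟩
      exact (h2 b v kp lv (hall b hSb hab) hlv).mpr hcb
    · intro hkl
      exact ⟨b0, hSb0, hab0, (h2 b0 v kp lv hlb0 hlv).mp hkl⟩
  have hconn_old : ∀ u v lu lv, L[u]? = some lu → L[v]? = some lv →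
      (connP (Pref n corr x (y + 1)) u v ↔ lu = lv) := by
    intro u v lu lv hlu hlv
    have hSu : Pref n corr x y u := (h1 u).mp (by rw [hlu]; rfl)
    have hSv : Pref n corr x y v := (h1 v).mp (by rw [hlv]; rfl)
    rw [connP_congr hS', connP_insert_old hSc hSu hSv]
    constructor
    · rintro (hc | ⟨⟨a, hSa, haj, hca⟩, ⟨b, hSb, hbj, hcb⟩⟩)
      · exact (h2 u v lu lv hlu hlv).mpr hc
      · have e1 : lu = kp := (h2 u a lu kp hlu (hall a hSa haj)).mpr hca
        have e2 : kp = lv := (h2 b v kp lv (hall b hSb hbj) hlv).mpr hcb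
        omega
    · intro he
      exact Or.inl ((h2 u v lu lv hlu hlv).mp he)
  refine ⟨?_, ?_, ?_, ?_⟩
  · intro w
    rw [hm_get?_insert]
    by_cases hw : w = (x, y)
    · rw [if_pos hw, hS' w]; simp [hw]
    · rw [if_neg hw, h1 w, hS' w]; simp [hw]
  · intro u v iu jv hu' hv'
    rw [hm_get?_insert] at hu' hv'
    by_cases hcu : u = (x, y) <;> by_cases hcv : v = (x, y)
    · rw [if_pos hcu] at hu'; rw [if_pos hcv] at hv'
      have e1 : kp = iu := Option.some_inj.mp hu'
      have e2 : kp = jv := Option.some_inj.mp hv'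
      subst hcu; subst hcv
      constructor
      · intro _; exact Relation.ReflTransGen.refl
      · intro _; omega
    · rw [if_pos hcu] at hu'; rw [if_neg hcv] at hv'
      have e1 : kp = iu := Option.some_inj.mp hu'
      subst hcu
      rw [hconn_new v jv hv']
      constructor <;> intro hh <;> omega
    · rw [if_neg hcu] at hu'; rw [if_pos hcv] at hv'
      have e2 : kp = jv := Option.some_inj.mp hv'
      subst hcv
      have hsy : connP (Pref n corr x (y + 1)) u (x, y) ↔
          connP (Pref n corr x (y + 1)) (x, y) u := ⟨connP_symm, connP_symm⟩
      rw [hsy, hconn_new u iu hu']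
      constructor <;> intro hh <;> omega
    · rw [if_neg hcu] at hu'; rw [if_neg hcv] at hv'
      rw [hconn_old u v iu jv hu' hv']
  · intro w i hwi
    rw [hm_get?_insert] at hwi
    by_cases hw : w = (x, y)
    · rw [if_pos hw] at hwi
      have : kp = i := Option.some_inj.mp hwi
      omega
    · rw [if_neg hw] at hwi
      exact h3 w i hwi
  · intro jj cc
    rw [hgd, hm_get?_insert]
    by_cases hj : jj = kp
    · subst hj
      rw [if_pos rfl]
      constructor
      · rintro ⟨lst, hsome, hin⟩
        have hlst : lst = lk ++ [(x, y)] := (Option.some_inj.mp hsome).symm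
        subst hlst
        rcases List.mem_append.mp hin with hin | hin
        · have hlcc := (hmemk cc).mp hin
          have hScc : Pref n corr x y cc := (h1 cc).mp (by rw [hlcc]; rfl)
          have hnecc : cc ≠ (x, y) := fun e => hSc (e ▸ hScc)
          rw [hm_get?_insert, if_neg hnecc]
          exact hlcc
        · rw [List.mem_singleton] at hin
          subst hin
          rw [hm_get?_insert, if_pos rfl]
      · intro hcc
        rw [hm_get?_insert] at hcc
        refine ⟨lk ++ [(x, y)], rfl, ?_⟩
        by_cases hccc : cc = (x, y)
        · simp [hccc]
        · rw [if_neg hccc] at hcc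
          exact List.mem_append_left _ ((hmemk cc).mpr hcc)
    · rw [if_neg hj]
      constructor
      · rintro ⟨lst, hsome, hin⟩
        have hlcc := (h4 jj cc).mp ⟨lst, hsome, hin⟩
        have hScc : Pref n corr x y cc := (h1 cc).mp (by rw [hlcc]; rfl)
        have hnecc : cc ≠ (x, y) := fun e => hSc (e ▸ hScc)
        rw [hm_get?_insert, if_neg hnecc]
        exact hlcc
      · intro hcc
        rw [hm_get?_insert] at hcc
        by_cases hccc : cc = (x, y)
        · rw [if_pos hccc] at hcc
          exact absurd (Option.some_inj.mp hcc).symm hj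
        · rw [if_neg hccc] at hcc
          exact (h4 jj cc).mpr hcc

lemma binv_merge (n : Int) (corr : List (Int × Int)) (x y : Int)
    (L : Std.HashMap (Int × Int) Int) (M : Std.HashMap Int (List (Int × Int))) (nxt : Int)
    (keep other : Int)
    (hx : 0 ≤ x) (hx' : x < n) (hy : 0 ≤ y) (hy' : y < n) (hbad : (x, y) ∉ corr)
    (h : BInv n corr x y (L, M, nxt))
    (hko : keep ≠ other)
    (hall : ∀ b, Pref n corr x y b → adjP b (x, y) →
      (L[b]? = some keep ∨ L[b]? = some other))
    (hexk : ∃ b, Pref n corr x y b ∧ adjP b (x, y) ∧ L[b]? = some keep)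
    (hexo : ∃ b, Pref n corr x y b ∧ adjP b (x, y) ∧ L[b]? = some other) :
    BInv n corr x (y + 1)
      (((M.getD other []).foldl (fun l cc => l.insert cc keep) L).insert (x, y) keep,
       ((M.insert keep (M.getD keep [] ++ M.getD other [])).erase other).insert keep
         ((((M.insert keep (M.getD keep [] ++ M.getD other [])).erase other).getD keep []) ++ [(x, y)]),
       nxt) := by
  rw [BInv_def] at h
  obtain ⟨h1, h2, h3, h4⟩ := h
  have hS' := pref_succ_iff hx hx' hy hy' hbad (n := n) (corr := corr)
  have hSc := not_pref_self n corr x y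
  obtain ⟨bk, hSbk, habk, hlbk⟩ := hexk
  obtain ⟨bo, hSbo, habo, hlbo⟩ := hexo
  have hkn : keep < nxt := h3 _ _ hlbk
  have hon : other < nxt := h3 _ _ hlbo
  obtain ⟨lk, hMk⟩ : ∃ lk, M[keep]? = some lk := by
    obtain ⟨lst, hm, -⟩ := (h4 keep bk).mpr hlbk
    exact ⟨lst, hm⟩
  obtain ⟨lo, hMo⟩ : ∃ lo, M[other]? = some lo := by
    obtain ⟨lst, hm, -⟩ := (h4 other bo).mpr hlbo
    exact ⟨lst, hm⟩
  have hmemk : ∀ cc, cc ∈ lk ↔ L[cc]? = some keep := by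
    intro cc
    constructor
    · intro hcc; exact (h4 keep cc).mp ⟨lk, hMk, hcc⟩
    · intro hcc
      obtain ⟨lst, hm, hin⟩ := (h4 keep cc).mpr hcc
      rw [hMk] at hm
      cases Option.some_inj.mp hm
      exact hin
  have hmemo : ∀ cc, cc ∈ lo ↔ L[cc]? = some other := by
    intro cc
    constructor
    · intro hcc; exact (h4 other cc).mp ⟨lo, hMo, hcc⟩
    · intro hcc
      obtain ⟨lst, hm, hin⟩ := (h4 other cc).mpr hcc
      rw [hMo] at hm
      cases Option.some_inj.mp hm
      exact hin
  have hgdk : M.getD keep [] = lk := by rw [Std.HashMap.getD_eq_getD_getElem?, hMk]; rfl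
  have hgdo : M.getD other [] = lo := by rw [Std.HashMap.getD_eq_getD_getElem?, hMo]; rfl
  rw [hgdk, hgdo]
  have hgd2 : ((M.insert keep (lk ++ lo)).erase other).getD keep [] = lk ++ lo := by
    rw [Std.HashMap.getD_eq_getD_getElem?, hm_get?_erase, if_neg hko, hm_get?_insert, if_pos rfl]
    rfl
  rw [hgd2]
  -- final label lookup
  have hLfin : ∀ w, ((lo.foldl (fun l cc => l.insert cc keep) L).insert (x, y) keep)[w]?
      = if w = (x, y) then some keep
        else if L[w]? = some other then some keep else L[w]? := by
    intro w
    rw [hm_get?_insert]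
    by_cases hw : w = (x, y)
    · rw [if_pos hw, if_pos hw]
    · rw [if_neg hw, if_neg hw, get?_foldl_insert_const]
      by_cases hwo : w ∈ lo
      · rw [if_pos hwo, if_pos ((hmemo w).mp hwo)]
      · rw [if_neg hwo, if_neg (fun hh => hwo ((hmemo w).mpr hh))]
  -- connectivity characterisations
  have hconn_new : ∀ v lv, L[v]? = some lv →
      (connP (Pref n corr x (y + 1)) (x, y) v ↔ (lv = keep ∨ lv = other)) := by
    intro v lv hlv
    have hSv : Pref n corr x y v := (h1 v).mp (by rw [hlv]; rfl)
    rw [connP_congr hS', connP_insert_new hSc hSv]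
    constructor
    · rintro ⟨b, hSb, hab, hcb⟩
      rcases hall b hSb hab with hb | hb
      · exact Or.inl ((h2 b v keep lv hb hlv).mpr hcb).symm
      · exact Or.inr ((h2 b v other lv hb hlv).mpr hcb).symm
    · rintro (he | he)
      · exact ⟨bk, hSbk, habk, (h2 bk v keep lv hlbk hlv).mp he.symm⟩
      · exact ⟨bo, hSbo, habo, (h2 bo v other lv hlbo hlv).mp he.symm⟩
  have hconn_old : ∀ u v lu lv, L[u]? = some lu → L[v]? = some lv →
      (connP (Pref n corr x (y + 1)) u v ↔
        (lu = lv ∨ ((lu = keep ∨ lu = other) ∧ (lv = keep ∨ lv = other)))) := by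
    intro u v lu lv hlu hlv
    have hSu : Pref n corr x y u := (h1 u).mp (by rw [hlu]; rfl)
    have hSv : Pref n corr x y v := (h1 v).mp (by rw [hlv]; rfl)
    rw [connP_congr hS', connP_insert_old hSc hSu hSv]
    constructor
    · rintro (hc | ⟨⟨a, hSa, haj, hca⟩, ⟨b, hSb, hbj, hcb⟩⟩)
      · exact Or.inl ((h2 u v lu lv hlu hlv).mpr hc)
      · refine Or.inr ⟨?_, ?_⟩
        · rcases hall a hSa haj with hb | hb
          · exact Or.inl ((h2 u a lu keep hlu hb).mpr hca)
          · exact Or.inr ((h2 u a lu other hlu hb).mpr hca)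
        · rcases hall b hSb hbj with hb | hb
          · exact Or.inl ((h2 b v keep lv hb hlv).mpr hcb).symm
          · exact Or.inr ((h2 b v other lv hb hlv).mpr hcb).symm
    · rintro (he | ⟨he1, he2⟩)
      · exact Or.inl ((h2 u v lu lv hlu hlv).mp he)
      · refine Or.inr ⟨?_, ?_⟩
        · rcases he1 with he1 | he1
          · exact ⟨bk, hSbk, habk, (h2 u bk lu keep hlu hlbk).mp he1⟩
          · exact ⟨bo, hSbo, habo, (h2 u bo lu other hlu hlbo).mp he1⟩
        · rcases he2 with he2 | he2
          · exact ⟨bk, hSbk, habk, (h2 bk v keep lv hlbk hlv).mp he2.symm⟩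
          · exact ⟨bo, hSbo, habo, (h2 bo v other lv hlbo hlv).mp he2.symm⟩
  rw [BInv_def]
  refine ⟨?_, ?_, ?_, ?_⟩
  · intro w
    rw [hLfin w]
    by_cases hw : w = (x, y)
    · rw [if_pos hw]
      simp only [Option.isSome_some, true_iff]
      exact (hS' w).mpr (Or.inr hw)
    · rw [if_neg hw]
      by_cases hwo : L[w]? = some other
      · rw [if_pos hwo]
        simp only [Option.isSome_some, true_iff]
        exact (hS' w).mpr (Or.inl ((h1 w).mp (by rw [hwo]; rfl)))
      · rw [if_neg hwo, h1 w, hS' w]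
        simp [hw]
  · intro u v iu jv hu' hv'
    rw [hLfin] at hu' hv'
    by_cases hcu : u = (x, y) <;> by_cases hcv : v = (x, y)
    · rw [if_pos hcu] at hu'; rw [if_pos hcv] at hv'
      have e1 : keep = iu := Option.some_inj.mp hu'
      have e2 : keep = jv := Option.some_inj.mp hv'
      subst hcu; subst hcv
      constructor
      · intro _; exact Relation.ReflTransGen.refl
      · intro _; omega
    · rw [if_pos hcu] at hu'; rw [if_neg hcv] at hv'
      have e1 : keep = iu := Option.some_inj.mp hu'
      rcases hLv : L[v]? with _ | lv
      · rw [hLv] at hv'; simp at hv'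
      · rw [hLv] at hv'
        subst hcu
        rw [hconn_new v lv hLv]
        by_cases hlo : lv = other
        · rw [if_pos (by rw [hlo])] at hv'
          have e2 : keep = jv := Option.some_inj.mp hv'
          constructor
          · intro _; exact Or.inr hlo
          · intro _; omega
        · rw [if_neg (by simpa using hlo)] at hv'
          have e2 : lv = jv := Option.some_inj.mp hv'
          constructor
          · intro hh; omega
          · intro hh; omega
    · rw [if_neg hcu] at hu'; rw [if_pos hcv] at hv'
      have e2 : keep = jv := Option.some_inj.mp hv'
      rcases hLu : L[u]? with _ | lu
      · rw [hLu] at hu'; simp at hu'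
      · rw [hLu] at hu'
        subst hcv
        have hsy : connP (Pref n corr x (y + 1)) u (x, y) ↔
            connP (Pref n corr x (y + 1)) (x, y) u := ⟨connP_symm, connP_symm⟩
        rw [hsy, hconn_new u lu hLu]
        by_cases hlo : lu = other
        · rw [if_pos (by rw [hlo])] at hu'
          have e1 : keep = iu := Option.some_inj.mp hu'
          constructor
          · intro _; exact Or.inr hlo
          · intro _; omega
        · rw [if_neg (by simpa using hlo)] at hu'
          have e1 : lu = iu := Option.some_inj.mp hu'
          constructor
          · intro hh; omega
          · intro hh; omega
    · rw [if_neg hcu] at hu'; rw [if_neg hcv] at hv'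
      rcases hLu : L[u]? with _ | lu
      · rw [hLu] at hu'; simp at hu'
      · rcases hLv : L[v]? with _ | lv
        · rw [hLv] at hv'; simp at hv'
        · rw [hLu] at hu'; rw [hLv] at hv'
          rw [hconn_old u v lu lv hLu hLv]
          by_cases hluo : lu = other <;> by_cases hlvo : lv = other
          · rw [if_pos (by rw [hluo])] at hu'; rw [if_pos (by rw [hlvo])] at hv'
            have e1 : keep = iu := Option.some_inj.mp hu'
            have e2 : keep = jv := Option.some_inj.mp hv'
            constructor
            · intro _; omega
            · intro _; omega
          · rw [if_pos (by rw [hluo])] at hu'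
            rw [if_neg (by simpa using hlvo)] at hv'
            have e1 : keep = iu := Option.some_inj.mp hu'
            have e2 : lv = jv := Option.some_inj.mp hv'
            constructor
            · intro hh; omega
            · intro hh; omega
          · rw [if_neg (by simpa using hluo)] at hu'
            rw [if_pos (by rw [hlvo])] at hv'
            have e1 : lu = iu := Option.some_inj.mp hu'
            have e2 : keep = jv := Option.some_inj.mp hv'
            constructor
            · intro hh; omega
            · intro hh; omega
          · rw [if_neg (by simpa using hluo)] at hu'
            rw [if_neg (by simpa using hlvo)] at hv'
            have e1 : lu = iu := Option.some_inj.mp hu'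
            have e2 : lv = jv := Option.some_inj.mp hv'
            constructor
            · intro hh; omega
            · intro hh; omega
  · intro w i hwi
    rw [hLfin] at hwi
    by_cases hw : w = (x, y)
    · rw [if_pos hw] at hwi
      have : keep = i := Option.some_inj.mp hwi
      omega
    · rw [if_neg hw] at hwi
      by_cases hwo : L[w]? = some other
      · rw [if_pos hwo] at hwi
        have : keep = i := Option.some_inj.mp hwi
        omega
      · rw [if_neg hwo] at hwi
        exact h3 w i hwi
  · intro jj cc
    rw [hm_get?_insert]
    by_cases hj : jj = keep
    · subst hj
      rw [if_pos rfl]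
      constructor
      · rintro ⟨lst, hsome, hin⟩
        have hlst : lst = (lk ++ lo) ++ [(x, y)] := (Option.some_inj.mp hsome).symm
        subst hlst
        rw [hLfin]
        rcases List.mem_append.mp hin with hin | hin
        · rcases List.mem_append.mp hin with hin | hin
          · have hlcc := (hmemk cc).mp hin
            have hScc : Pref n corr x y cc := (h1 cc).mp (by rw [hlcc]; rfl)
            have hnecc : cc ≠ (x, y) := fun e => hSc (e ▸ hScc)
            rw [if_neg hnecc, if_neg (by rw [hlcc]; simp; omega)]
            exact hlcc
          · have hlcc := (hmemo cc).mp hin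
            have hScc : Pref n corr x y cc := (h1 cc).mp (by rw [hlcc]; rfl)
            have hnecc : cc ≠ (x, y) := fun e => hSc (e ▸ hScc)
            rw [if_neg hnecc, if_pos hlcc]
        · rw [List.mem_singleton] at hin
          rw [if_pos hin]
      · intro hcc
        rw [hLfin] at hcc
        refine ⟨(lk ++ lo) ++ [(x, y)], rfl, ?_⟩
        by_cases hccc : cc = (x, y)
        · simp [hccc]
        · rw [if_neg hccc] at hcc
          by_cases hcco : L[cc]? = some other
          · rw [if_pos hcco] at hcc
            exact List.mem_append_left _ (List.mem_append_right _ ((hmemo cc).mpr hcco))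
          · rw [if_neg hcco] at hcc
            exact List.mem_append_left _ (List.mem_append_left _ ((hmemk cc).mpr hcc))
    · rw [if_neg hj]
      by_cases ho : jj = other
      · subst ho
        rw [hm_get?_erase, if_pos rfl]
        constructor
        · rintro ⟨lst, hsome, -⟩
          simp at hsome
        · intro hcc
          rw [hLfin] at hcc
          by_cases hccc : cc = (x, y)
          · rw [if_pos hccc] at hcc
            exact absurd (Option.some_inj.mp hcc) hko
          · rw [if_neg hccc] at hcc
            by_cases hcco : L[cc]? = some jj
            · rw [if_pos hcco] at hcc
              exact absurd (Option.some_inj.mp hcc) hko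
            · rw [if_neg hcco] at hcc
              exact absurd hcc hcco
      · rw [hm_get?_erase, if_neg ho, hm_get?_insert, if_neg hj]
        constructor
        · rintro ⟨lst, hsome, hin⟩
          have hlcc := (h4 jj cc).mp ⟨lst, hsome, hin⟩
          have hScc : Pref n corr x y cc := (h1 cc).mp (by rw [hlcc]; rfl)
          have hnecc : cc ≠ (x, y) := fun e => hSc (e ▸ hScc)
          rw [hLfin, if_neg hnecc, if_neg (by rw [hlcc]; simp; omega)]
          exact hlcc
        · intro hcc
          rw [hLfin] at hcc
          by_cases hccc : cc = (x, y)
          · rw [if_pos hccc] at hcc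
            exact absurd (Option.some_inj.mp hcc).symm hj
          · rw [if_neg hccc] at hcc
            by_cases hcco : L[cc]? = some other
            · rw [if_pos hcco] at hcc
              exact absurd (Option.some_inj.mp hcc).symm hj
            · rw [if_neg hcco] at hcc
              exact (h4 jj cc).mpr hcc

lemma altCell_step (n : Int) (corr : List (Int × Int)) (x y : Int) (st : BState)
    (hx : 0 ≤ x) (hx' : x < n) (hy : 0 ≤ y) (hy' : y < n)
    (h : BInv n corr x y st) :
    BInv n corr x (y + 1) (altCell (Std.HashSet.ofList corr) st x y) := by
  obtain ⟨L, M, nxt⟩ := st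
  rw [BInv_def] at h
  by_cases hbad : (x, y) ∈ corr
  · have hg : (x, y) ∈ Std.HashSet.ofList corr := by
      rw [hs_mem_ofList]; exact hbad
    have hstep : altCell (Std.HashSet.ofList corr) (L, M, nxt) x y = (L, M, nxt) := by
      simp only [altCell]; rw [if_pos hg]
    rw [hstep]
    exact BInv_congr (pref_skip_iff hbad) _ ((BInv_def n corr x y L M nxt).mpr h)
  · have hg : (x, y) ∉ Std.HashSet.ofList corr := by
      rw [hs_mem_ofList]; exact hbad
    obtain ⟨h1, h2, h3, h4⟩ := h
    rcases hu : L[(x - 1, y)]? with _ | i <;> rcases hl : L[(x, y - 1)]? with _ | j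
    · -- no labelled neighbour: fresh label
      have hstep : altCell (Std.HashSet.ofList corr) (L, M, nxt) x y =
          (L.insert (x, y) nxt, M.insert nxt [(x, y)], nxt + 1) := by
        simp only [altCell]
        rw [if_neg hg]
        simp [hu, hl]
      rw [hstep]
      refine binv_fresh n corr x y L M nxt hx hx' hy hy' hbad ((BInv_def n corr x y L M nxt).mpr ⟨h1, h2, h3, h4⟩) ?_
      intro b hb hadj
      rcases pref_neighbors hb hadj with rfl | rfl
      · have := (h1 _).mpr hb; rw [hu] at this; simp at this
      · have := (h1 _).mpr hb; rw [hl] at this; simp at this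
    · -- only the left neighbour is labelled (label j)
      have hstep : altCell (Std.HashSet.ofList corr) (L, M, nxt) x y =
          (L.insert (x, y) j, M.insert j (M.getD j [] ++ [(x, y)]), nxt) := by
        simp only [altCell]
        rw [if_neg hg]
        simp [hu, hl]
      rw [hstep]
      refine binv_attach n corr x y L M nxt j hx hx' hy hy' hbad ((BInv_def n corr x y L M nxt).mpr ⟨h1, h2, h3, h4⟩) ?_ ?_
      · intro b hb hadj
        rcases pref_neighbors hb hadj with rfl | rfl
        · have := (h1 _).mpr hb; rw [hu] at this; simp at this
        · exact hl
      · exact ⟨(x, y - 1), (h1 _).mp (by rw [hl]; rfl), adj_left x y, hl⟩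
    · -- only the upper neighbour is labelled (label i)
      have hstep : altCell (Std.HashSet.ofList corr) (L, M, nxt) x y =
          (L.insert (x, y) i, M.insert i (M.getD i [] ++ [(x, y)]), nxt) := by
        simp only [altCell]
        rw [if_neg hg]
        simp [hu, hl]
      rw [hstep]
      refine binv_attach n corr x y L M nxt i hx hx' hy hy' hbad ((BInv_def n corr x y L M nxt).mpr ⟨h1, h2, h3, h4⟩) ?_ ?_
      · intro b hb hadj
        rcases pref_neighbors hb hadj with rfl | rfl
        · exact hu
        · have := (h1 _).mpr hb; rw [hl] at this; simp at this
      · exact ⟨(x - 1, y), (h1 _).mp (by rw [hu]; rfl), adj_up x y, hu⟩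
    · -- both neighbours labelled
      by_cases hji : j = i
      · subst hji
        have hstep : altCell (Std.HashSet.ofList corr) (L, M, nxt) x y =
            (L.insert (x, y) j, M.insert j (M.getD j [] ++ [(x, y)]), nxt) := by
          simp only [altCell]
          rw [if_neg hg]
          simp [hu, hl]
        rw [hstep]
        refine binv_attach n corr x y L M nxt j hx hx' hy hy' hbad ((BInv_def n corr x y L M nxt).mpr ⟨h1, h2, h3, h4⟩) ?_ ?_
        · intro b hb hadj
          rcases pref_neighbors hb hadj with rfl | rfl
          · exact hu
          · exact hl
        · exact ⟨(x - 1, y), (h1 _).mp (by rw [hu]; rfl), adj_up x y, hu⟩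
      · by_cases hsw : (M.getD j []).length > (M.getD i []).length
        · have hstep : altCell (Std.HashSet.ofList corr) (L, M, nxt) x y =
              (((M.getD i []).foldl (fun l cc => l.insert cc j) L).insert (x, y) j,
               ((M.insert j (M.getD j [] ++ M.getD i [])).erase i).insert j
                 ((((M.insert j (M.getD j [] ++ M.getD i [])).erase i).getD j []) ++ [(x, y)]),
               nxt) := by
            simp only [altCell]
            rw [if_neg hg]
            simp [hu, hl, hji, hsw]
          rw [hstep]
          refine binv_merge n corr x y L M nxt j i hx hx' hy hy' hbad ((BInv_def n corr x y L M nxt).mpr ⟨h1, h2, h3, h4⟩)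
            (fun e => hji e) ?_ ?_ ?_
          · intro b hb hadj
            rcases pref_neighbors hb hadj with rfl | rfl
            · exact Or.inr hu
            · exact Or.inl hl
          · exact ⟨(x, y - 1), (h1 _).mp (by rw [hl]; rfl), adj_left x y, hl⟩
          · exact ⟨(x - 1, y), (h1 _).mp (by rw [hu]; rfl), adj_up x y, hu⟩
        · have hstep : altCell (Std.HashSet.ofList corr) (L, M, nxt) x y =
              (((M.getD j []).foldl (fun l cc => l.insert cc i) L).insert (x, y) i,
               ((M.insert i (M.getD i [] ++ M.getD j [])).erase j).insert i
                 ((((M.insert i (M.getD i [] ++ M.getD j [])).erase j).getD i []) ++ [(x, y)]),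
               nxt) := by
            simp only [altCell]
            rw [if_neg hg]
            simp [hu, hl, hji, hsw]
          rw [hstep]
          refine binv_merge n corr x y L M nxt i j hx hx' hy hy' hbad ((BInv_def n corr x y L M nxt).mpr ⟨h1, h2, h3, h4⟩)
            (fun e => hji e.symm) ?_ ?_ ?_
          · intro b hb hadj
            rcases pref_neighbors hb hadj with rfl | rfl
            · exact Or.inl hu
            · exact Or.inr hl
          · exact ⟨(x - 1, y), (h1 _).mp (by rw [hu]; rfl), adj_up x y, hu⟩
          · exact ⟨(x, y - 1), (h1 _).mp (by rw [hl]; rfl), adj_left x y, hl⟩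

lemma pref_row_iff {n : Int} {corr : List (Int × Int)} {x : Int} :
    ∀ w, Pref n corr x n w ↔ Pref n corr (x + 1) 0 w := by
  rintro ⟨w1, w2⟩
  simp only [Pref]
  constructor
  · rintro ⟨a1, a2, a3, a4, a5, a6⟩
    exact ⟨a1, a2, a3, a4, a5, by simp at a6 ⊢ <;> omega⟩
  · rintro ⟨a1, a2, a3, a4, a5, a6⟩
    exact ⟨a1, a2, a3, a4, a5, by simp at a6 ⊢ <;> omega⟩

lemma pref_full_iff {n : Int} {corr : List (Int × Int)} :
    ∀ w, Pref n corr n 0 w ↔ FreeC n corr w := by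
  rintro ⟨w1, w2⟩
  simp only [Pref, FreeC]
  constructor
  · rintro ⟨a1, a2, a3, a4, a5, a6⟩
    exact ⟨a1, a2, a3, a4, a5⟩
  · rintro ⟨a1, a2, a3, a4, a5⟩
    exact ⟨a1, a2, a3, a4, a5, Or.inl a2⟩

lemma inner_loop (n : Int) (corr : List (Int × Int)) (x : Int)
    (hx : 0 ≤ x) (hx' : x < n) :
    ∀ (k : Nat) (y : Int) (st : BState), y + k = n → 0 ≤ y → BInv n corr x y st →
      BInv n corr x n ((PySem.List.pyRange y n 1).foldl
        (fun st y => altCell (Std.HashSet.ofList corr) st x y) st) := by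
  intro k
  induction k with
  | zero =>
      intro y st hyk hy0 hB
      have he : y = n := by omega
      subst he
      rw [PySem.List.pyRange_one_eq_nil (le_refl y)]
      exact hB
  | succ k ih =>
      intro y st hyk hy0 hB
      have hlt : y < n := by omega
      rw [PySem.List.pyRange_one_cons hlt]
      simp only [List.foldl_cons]
      exact ih (y + 1) _ (by omega) (by omega)
        (altCell_step n corr x y st hx hx' hy0 hlt hB)

lemma outer_loop (n : Int) (corr : List (Int × Int)) :
    ∀ (k : Nat) (x : Int) (st : BState), x + k = n → 0 ≤ x → BInv n corr x 0 st →
      BInv n corr n 0 ((PySem.List.pyRange x n 1).foldl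
        (fun st x => (PySem.List.pyRange 0 n 1).foldl
          (fun st y => altCell (Std.HashSet.ofList corr) st x y) st) st) := by
  intro k
  induction k with
  | zero =>
      intro x st hxk hx0 hB
      have he : x = n := by omega
      subst he
      rw [PySem.List.pyRange_one_eq_nil (le_refl x)]
      exact hB
  | succ k ih =>
      intro x st hxk hx0 hB
      have hlt : x < n := by omega
      have hn0 : (n.toNat : Int) = n := Int.toNat_of_nonneg (by omega)
      rw [PySem.List.pyRange_one_cons hlt]
      simp only [List.foldl_cons]
      have hrow := inner_loop n corr x hx0 hlt n.toNat 0 st (by omega) (le_refl 0) hB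
      exact ih (x + 1) _ (by omega) (by omega)
        (BInv_congr pref_row_iff _ hrow)

lemma B_iff (n : Int) (corr : List (Int × Int)) (hn : 1 ≤ n)
    (hs : (0, 0) ∉ corr) (hg : (n - 1, n - 1) ∉ corr) :
    (is_path_possible_alt n corr = true ↔ connP (FreeC n corr) (0, 0) (n - 1, n - 1)) := by
  unfold is_path_possible_alt
  rw [if_neg (by
    rw [hs_mem_ofList, hs_mem_ofList]
    rintro (h | h); exacts [hs h, hg h])]
  have hn0 : (n.toNat : Int) = n := Int.toNat_of_nonneg (by omega)
  have hinit : BInv n corr 0 0 ((∅ : Std.HashMap (Int × Int) Int), (∅ : Std.HashMap Int (List (Int × Int))), (0 : Int)) := by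
    rw [BInv_def]
    refine ⟨?_, ?_, ?_, ?_⟩
    · intro c
      rw [Std.HashMap.getElem?_empty]
      constructor
      · intro hh; simp at hh
      · rintro ⟨a1, a2, a3, a4, a5, a6⟩
        exfalso
        obtain ⟨c1, c2⟩ := c
        simp at a6
        omega
    · intro u v i j hu'
      rw [Std.HashMap.getElem?_empty] at hu'
      simp at hu'
    · intro c i hc
      rw [Std.HashMap.getElem?_empty] at hc
      simp at hc
    · intro jj cc
      constructor
      · rintro ⟨lst, hm, -⟩
        rw [Std.HashMap.getElem?_empty] at hm
        simp at hm
      · intro hcc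
        rw [Std.HashMap.getElem?_empty] at hcc
        simp at hcc
  have hB := outer_loop n corr n.toNat 0 ((∅ : Std.HashMap (Int × Int) Int), (∅ : Std.HashMap Int (List (Int × Int))), (0 : Int))
    (by omega) (le_refl 0) hinit
  obtain ⟨hf1, hf2, hf3, hf4⟩ := hB
  have hp0 : Pref n corr n 0 (0, 0) := ⟨le_refl 0, by omega, le_refl 0, by omega, hs, by simp <;> omega⟩
  have hpg : Pref n corr n 0 (n - 1, n - 1) := ⟨by omega, by omega, by omega, by omega, hg, by simp <;> omega⟩
  obtain ⟨l0, hl0⟩ := Option.isSome_iff_exists.mp ((hf1 (0, 0)).mpr hp0)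
  obtain ⟨lg, hlg⟩ := Option.isSome_iff_exists.mp ((hf1 (n - 1, n - 1)).mpr hpg)
  simp only [hl0, hlg, Option.some_inj, decide_eq_true_eq]
  have h2' := hf2 (0, 0) (n - 1, n - 1) l0 lg hl0 hlg
  rw [connP_congr pref_full_iff] at h2'
  constructor
  · intro hh; exact h2'.mp hh.symm
  · intro hh; exact (h2'.mpr hh).symm

lemma B_nonpos (n : Int) (corr : List (Int × Int)) (hn : n ≤ 0)
    (hs : (0, 0) ∉ corr) (hg : (n - 1, n - 1) ∉ corr) :
    is_path_possible_alt n corr = false := by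
  unfold is_path_possible_alt
  rw [if_neg (by
    rw [hs_mem_ofList, hs_mem_ofList]
    rintro (h | h); exacts [hs h, hg h])]
  rw [PySem.List.pyRange_one_eq_nil hn]
  simp only [List.foldl_nil]
  rw [Std.HashMap.getElem?_empty]

lemma main_eq (n : Int) (corr : List (Int × Int)) :
    is_path_possible n corr = is_path_possible_alt n corr := by
  by_cases hsg : (0, 0) ∈ corr ∨ (n - 1, n - 1) ∈ corr
  · simp [is_path_possible, is_path_possible_alt, hs_mem_ofList, hsg]
  · push_neg at hsg
    by_cases hn : 1 ≤ n
    · rw [Bool.eq_iff_iff, A_iff n corr hn hsg.1 hsg.2, B_iff n corr hn hsg.1 hsg.2]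
    · rw [A_nonpos n corr (by omega) hsg.1 hsg.2, B_nonpos n corr (by omega) hsg.1 hsg.2]

-- ===== VERDICT (by name: the statement is the Claim_ definition above) =====
theorem is_path_possible_spec : Claim_equal_is_path_possible := by
  intro n corr _
  exact main_eq n corr
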